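-- pv_equiv track=rewrite | github.com/sanjaythacker/python | formatOriginalIP.py | reformatIP
-- ===== SOURCE A (Python) =====
-- def reformatIP(unclickableIP):
--
--     # The solution travels the IP address character by character and
--     # reconstructs the IP without any non-IP characters that are found.
--     # Valid IP characters are numbers and the period "." character.
--     # Every other character is non-IP character and needs to be removed
--     # to create the original IP address.
--
--     # Iterate through the unclickableIP string and check each character
--     originalIP = ''  # storage of originalIP which is built back
--     currentOctet = ''
--     numOfPeriods = 0
--     for currentChar in unclickableIP:
--         if  currentChar.isnumeric():
--             currentOctet += currentChar
--             continue
--         elif currentChar == '.':     # this implies end of octet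
--             if int(currentOctet) <= 255:
--                 originalIP += currentOctet
--             else:
--                 return('Invalid Original IP')
--             originalIP += currentChar
--             currentOctet = ''       # re-intialize currentOctect to start new Octet
--             continue
--         elif ((not currentChar.isnumeric()) and (currentChar != '.')):
--             # is it a non-IP character? If so, drop this character
--             continue
--
--     # add the last octet, if valid, to the original IP
--     # else return error message that original IP is invalid
--     if currentOctet != '':
--         if int(currentOctet) <= 255:
--             originalIP += currentOctet
--         else:
--             return ('Invalid Original IP')
--
--     # return the original valid IP address
--     return(originalIP)
-- ===== SOURCE B (Python) =====
-- def reformatIP(unclickableIP):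
--     cleaned = ''.join(c for c in unclickableIP if c.isnumeric() or c == '.')
--     parts = cleaned.split('.')
--     for i, part in enumerate(parts):
--         if i < len(parts) - 1 or part != '':
--             if int(part) > 255:
--                 return 'Invalid Original IP'
--     return '.'.join(parts)
-- ===== Notes on version B (the rewrite author's own statement) =====
-- stated objective: simpler
-- what changed: Replaces A's character-by-character octet state machine with a filter-split-validate-join pipeline: keep only digit/period characters, split on the period, validate each part (the last only when nonempty), and rejoin the parts with periods.
import Mathlib
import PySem

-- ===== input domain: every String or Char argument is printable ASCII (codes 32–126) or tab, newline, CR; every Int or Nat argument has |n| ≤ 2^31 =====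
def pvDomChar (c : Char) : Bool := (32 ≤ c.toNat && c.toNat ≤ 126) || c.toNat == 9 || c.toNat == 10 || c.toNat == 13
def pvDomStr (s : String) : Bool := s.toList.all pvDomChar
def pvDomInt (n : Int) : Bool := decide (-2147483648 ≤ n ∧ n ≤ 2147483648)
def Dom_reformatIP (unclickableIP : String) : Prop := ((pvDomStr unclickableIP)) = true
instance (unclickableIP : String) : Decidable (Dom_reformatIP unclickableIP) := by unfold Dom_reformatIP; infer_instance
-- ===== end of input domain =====

-- B replaces A's character-by-character octet state machine by filter / split on '.' /
-- validate parts / rejoin (objective: simpler). Same return value wherever A returns.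

-- ===== PORT A =====
-- A's loop: state = (originalIP built so far, current octet); early return 'Invalid Original IP';
-- `none` models the ValueError Python's int raises on an empty octet at a period (excluded by Pre_).
def reformatIP_go (acc oct : List Char) : List Char → Option (List Char)
  | [] =>
      if oct ≠ [] then
        match PySem.Int.ofChars? oct with
        | none => none
        | some n => if n ≤ 255 then some (acc ++ oct) else some "Invalid Original IP".toList
      else some acc
  | c :: rest =>
      if PySem.Chars.isdigit c then reformatIP_go acc (oct ++ [c]) rest
      else if c = '.' then
        match PySem.Int.ofChars? oct with
        | none => none
        | some n =>
          if n ≤ 255 then reformatIP_go (acc ++ oct ++ ['.']) [] rest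
          else some "Invalid Original IP".toList
      else reformatIP_go acc oct rest

def reformatIP (unclickableIP : String) : String :=
  match reformatIP_go [] [] unclickableIP.toList with
  | some r => String.ofList r
  | none => ""   -- unreachable under Pre_: Python raises ValueError here

-- ===== PORT B =====
-- cleaned.split('.') (Python str.split with a one-char separator), hand-ported for List Char
def pvSplitDot : List Char → List (List Char)
  | [] => [[]]
  | c :: rest =>
      if c = '.' then [] :: pvSplitDot rest
      else
        match pvSplitDot rest with
        | [] => [[c]]            -- unreachable: pvSplitDot never returns []
        | p :: ps => (c :: p) :: ps

-- B's validation loop: checks every part except an empty last part; some true = all ≤ 255,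
-- some false = early invalid result, none = the ValueError int raises on an empty part (excluded by Pre_)
def pvCheckParts : List (List Char) → Option Bool
  | [] => some true
  | [p] =>
      if p = [] then some true
      else
        match PySem.Int.ofChars? p with
        | none => none
        | some n => if 255 < n then some false else some true
  | p :: q :: ps =>
      match PySem.Int.ofChars? p with
      | none => none
      | some n => if 255 < n then some false else pvCheckParts (q :: ps)

-- '.'.join(parts)
def pvJoinDot : List (List Char) → List Char
  | [] => []
  | [p] => p
  | p :: q :: ps => p ++ '.' :: pvJoinDot (q :: ps)

def reformatIP_alt (unclickableIP : String) : String :=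
  let cleaned := unclickableIP.toList.filter (fun c => PySem.Chars.isdigit c || c = '.')
  let parts := pvSplitDot cleaned
  match pvCheckParts parts with
  | some true => String.ofList (pvJoinDot parts)
  | some false => "Invalid Original IP"
  | none => ""   -- unreachable under Pre_: Python raises ValueError here

-- ===== PRECONDITION & SPEC =====
-- Pre_ excludes exactly the inputs where Python A raises ValueError (int of an empty octet
-- at a period preceded by no digit): every part of the cleaned string split on periods, except the last,
-- must be nonempty. B raises the same ValueError there.
def Pre_reformatIP (unclickableIP : String) : Prop :=
  ∀ p ∈ ((unclickableIP.toList.filter (fun c => PySem.Chars.isdigit c || c = '.')).splitOn '.').dropLast,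
    p ≠ []
instance (unclickableIP : String) : Decidable (Pre_reformatIP unclickableIP) := by
  unfold Pre_reformatIP; infer_instance
def pvWitness_reformatIP : String := "19z2.1!68.x0.5 "
def Spec_reformatIP (unclickableIP : String) (out : String) : Prop := out = reformatIP_alt unclickableIP
instance (unclickableIP : String) (out : String) : Decidable (Spec_reformatIP unclickableIP out) := by unfold Spec_reformatIP; infer_instance

-- ===== CLAIM (what is proved, stated in full; the proofs are below) =====
def Claim_equal_reformatIP : Prop := ∀ (unclickableIP : String), Dom_reformatIP unclickableIP → Pre_reformatIP unclickableIP → Spec_reformatIP unclickableIP (reformatIP unclickableIP)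

-- ===== LEMMAS AND PROOFS =====

-- the result B computes from prefix `acc` and a cleaned character list `m`
def pvAltRes (acc m : List Char) : Option (List Char) :=
  match pvCheckParts (pvSplitDot m) with
  | some true => some (acc ++ pvJoinDot (pvSplitDot m))
  | some false => some "Invalid Original IP".toList
  | none => none

lemma pvSplitDot_ne_nil (l : List Char) : pvSplitDot l ≠ [] := by
  cases l with
  | nil => simp [pvSplitDot]
  | cons c rest =>
      simp only [pvSplitDot]
      split
      · simp
      · rcases h : pvSplitDot rest with _ | ⟨p, ps⟩ <;> simp

lemma pvSplitDot_no_dot (oct : List Char) (h : '.' ∉ oct) : pvSplitDot oct = [oct] := by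
  induction oct with
  | nil => rfl
  | cons c rest ih =>
      simp only [List.mem_cons, not_or] at h
      have hc : ¬ c = '.' := fun hc => h.1 hc.symm
      simp [pvSplitDot, hc, ih h.2]

lemma pvSplitDot_append_dot (oct rest : List Char) (h : '.' ∉ oct) :
    pvSplitDot (oct ++ '.' :: rest) = oct :: pvSplitDot rest := by
  induction oct with
  | nil => simp [pvSplitDot]
  | cons c t ih =>
      simp only [List.mem_cons, not_or] at h
      have hc : ¬ c = '.' := fun hc => h.1 hc.symm
      simp only [List.cons_append, pvSplitDot, if_neg hc, ih h.2]

-- main invariant: A's state machine from state (acc, oct) on remaining characters l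
-- computes B's split-validate-join result of oct ++ (l with junk filtered out)
lemma pvGo_eq_altRes (l : List Char) : ∀ acc oct : List Char, '.' ∉ oct →
    reformatIP_go acc oct l
      = pvAltRes acc (oct ++ l.filter (fun c => PySem.Chars.isdigit c || c = '.')) := by
  induction l with
  | nil =>
      intro acc oct hoct
      simp only [List.filter_nil, List.append_nil, reformatIP_go, pvAltRes,
        pvSplitDot_no_dot oct hoct]
      by_cases h : oct = []
      · subst h; simp [pvCheckParts, pvJoinDot]
      · rw [if_pos (show oct ≠ [] from h)]
        simp only [pvCheckParts, if_neg h]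
        rcases PySem.Int.ofChars? oct with _ | n
        · rfl
        · by_cases hn : (255 : Int) < n
          · simp [hn, not_le.mpr hn]
          · simp [hn, not_lt.mp hn, pvJoinDot]
  | cons c rest ih =>
      intro acc oct hoct
      simp only [reformatIP_go, List.filter_cons]
      by_cases hd : PySem.Chars.isdigit c
      · have hcd : c ≠ '.' := by
          intro hc; subst hc; simp [PySem.Chars.isdigit] at hd
        have : '.' ∉ oct ++ [c] := by simp [hoct, Ne.symm hcd]
        simp only [hd, Bool.true_or, if_pos, ih acc (oct ++ [c]) this,
          List.append_assoc, List.singleton_append]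
      · by_cases hc : c = '.'
        · subst hc
          simp only [hd, Bool.false_or, decide_true, if_pos]
          simp only [pvAltRes]
          rw [pvSplitDot_append_dot oct _ hoct]
          obtain ⟨q, ps, hq⟩ := List.exists_cons_of_ne_nil
            (pvSplitDot_ne_nil (rest.filter (fun c => PySem.Chars.isdigit c || c = '.')))
          rw [hq]
          simp only [pvCheckParts]
          rcases PySem.Int.ofChars? oct with _ | n
          · rfl
          · by_cases hn : (255 : Int) < n
            · simp [hn, not_le.mpr hn]
            · simp only [if_neg hn, if_pos (not_lt.mp hn)]
              rw [ih (acc ++ oct ++ ['.']) [] (by simp)]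
              simp only [pvAltRes, List.nil_append]
              rw [hq]
              rcases pvCheckParts (q :: ps) with _ | b
              · rfl
              · cases b
                · rfl
                · simp [pvJoinDot]
        · simp only [hd, hc, Bool.false_or, decide_false, if_neg,
            Bool.false_eq_true, not_false_eq_true, ih acc oct hoct]

-- ===== VERDICT (by name: the statement is the Claim_ definition above) =====
theorem reformatIP_spec : Claim_equal_reformatIP := by
  intro s _ _
  show reformatIP s = reformatIP_alt s
  rw [reformatIP, pvGo_eq_altRes s.toList [] [] (by simp), pvAltRes]
  simp only [List.nil_append, reformatIP_alt]
  rcases pvCheckParts (pvSplitDot (s.toList.filter (fun c => PySem.Chars.isdigit c || c = '.'))) with _ | b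
  · rfl
  · cases b
    · rfl
    · simp
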